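-- pv_equiv track=rewrite | github.com/vllm-project/vllm | vllm/model_executor/layers/quantization/utils/gptq_utils.py | is_layer_gptq_quantized
-- ===== SOURCE A (Python) =====
-- from collections.abc import Mapping
-- from types import MappingProxyType
--
-- def is_layer_gptq_quantized(
--     prefix: str,
--     quantized_layers: list[str],
--     fused_mapping: Mapping[str, list[str]] = MappingProxyType({}),
-- ) -> bool:
--     # prefix: model.layers.0.self_attn.q_proj
--     # proj_name: q_proj
--
--     # GPTQ's `modules_in_block_to_quantize`:
--     # Substr: ["self_attn.k_proj", "self_attn.v_proj", "self_attn.q_proj"]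
--     # Full prefix ["model.layers.0.self_attn.q_proj"]
--
--     proj_name = prefix.split(".")[-1]
--
--     # Fused layers like gate_up_proj or qkv_proj will not be fused
--     # in the safetensors checkpoint. So, we convert the name
--     # from the fused version to unfused + check to make sure that
--     # each shard of the fused layer has the same scheme.
--     if proj_name in fused_mapping:
--         shard_prefixes = [
--             prefix.replace(proj_name, shard_proj_name)
--             for shard_proj_name in fused_mapping[proj_name]
--         ]
--
--         is_quantized = None
--         for shard_prefix in shard_prefixes:
--             is_shard_quantized = any(
--                 layer in shard_prefix for layer in quantized_layers
--             )
--
--             if is_quantized is None: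
--                 is_quantized = is_shard_quantized
--             elif is_shard_quantized != is_quantized:
--                 raise ValueError(
--                     f"Detected some but not all shards of {prefix} "
--                     "are quantized. All shards of fused layers "
--                     "to have the same precision."
--                 )
--     else:
--         is_quantized = any(layer in prefix for layer in quantized_layers)
--
--     assert is_quantized is not None
--     return is_quantized
-- ===== SOURCE B (Python) =====
-- def is_layer_gptq_quantized(
--     prefix: str,
--     quantized_layers: list[str],
--     fused_mapping={},
-- ) -> bool:
--     # Inverted loop order: instead of asking, shard by shard, whether any
--     # quantized layer matches it, iterate over the quantized layers and
--     # collect the SET of shard indices each one hits.  The result is the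
--     # emptiness of that set; inconsistency is a cardinality check.
--     proj_name = prefix.split(".")[-1]
--     if proj_name in fused_mapping:
--         shard_prefixes = [
--             prefix.replace(proj_name, shard) for shard in fused_mapping[proj_name]
--         ]
--         assert shard_prefixes
--     else:
--         shard_prefixes = [prefix]
--
--     matched: set[int] = set()
--     for layer in quantized_layers:
--         matched.update(i for i, sp in enumerate(shard_prefixes) if layer in sp)
--         if len(matched) == len(shard_prefixes):
--             break
--
--     if matched and len(matched) != len(shard_prefixes):
--         raise ValueError(
--             f"Detected some but not all shards of {prefix} "
--             "are quantized. All shards of fused layers "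
--             "to have the same precision."
--         )
--     return bool(matched)
-- ===== Notes on version B (the rewrite author's own statement) =====
-- stated objective: alternative
-- what changed: Inverts the loop nesting: instead of A's per-shard scan over quantized layers with an Optional baseline and early raise, B iterates once over the quantized layers collecting the set of matched shard indices, returns that set's non-emptiness, and detects inconsistency by comparing the set's cardinality with the shard count; both branches are unified by treating the non-fused case as a single shard.
import Mathlib
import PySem

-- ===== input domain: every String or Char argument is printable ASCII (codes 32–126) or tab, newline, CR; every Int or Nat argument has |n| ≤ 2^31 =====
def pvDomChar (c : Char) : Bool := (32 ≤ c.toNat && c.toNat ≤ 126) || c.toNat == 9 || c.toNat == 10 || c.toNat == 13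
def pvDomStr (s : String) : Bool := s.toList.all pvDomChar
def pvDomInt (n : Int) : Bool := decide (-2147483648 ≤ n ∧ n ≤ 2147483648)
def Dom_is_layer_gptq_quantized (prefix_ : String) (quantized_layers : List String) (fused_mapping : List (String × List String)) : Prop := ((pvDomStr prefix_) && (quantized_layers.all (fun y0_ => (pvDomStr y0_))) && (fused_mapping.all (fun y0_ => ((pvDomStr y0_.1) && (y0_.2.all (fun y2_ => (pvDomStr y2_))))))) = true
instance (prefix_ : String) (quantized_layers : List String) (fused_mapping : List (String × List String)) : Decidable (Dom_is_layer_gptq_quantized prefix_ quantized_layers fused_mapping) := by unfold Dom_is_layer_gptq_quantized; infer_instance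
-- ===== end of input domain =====

-- B inverts A's loop nesting: instead of a per-shard baseline-and-early-raise
-- scan over quantized layers, it iterates over the quantized layers once,
-- collecting the SET of shard indices each hits; the answer is the set's
-- emptiness and inconsistency is a cardinality check (objective: alternative).

-- ===== PORT A =====
-- A's `for shard_prefix in shard_prefixes` loop: state `is_quantized : Option Bool`
-- (none = unset); the ValueError raise is modelled by returning none from the loop.
def pvALoop (quantized_layers : List String) (isq : Option Bool) : List String → Option Bool
  | [] => isq
  | shard_prefix :: rest =>
    let is_shard_quantized := quantized_layers.any (fun layer => PySem.Str.isIn layer shard_prefix)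
    match isq with
    | none => pvALoop quantized_layers (some is_shard_quantized) rest
    | some q => if is_shard_quantized ≠ q then none   -- raise ValueError (excluded by Pre_)
                else pvALoop quantized_layers (some q) rest

def is_layer_gptq_quantized (prefix_ : String) (quantized_layers : List String) (fused_mapping : List (String × List String)) : Bool :=
  let proj_name := ((PySem.Str.split? prefix_ ".").getD []).getLastD ""   -- "." ≠ "" so split? is some; split never returns [], so [-1] is exact
  match (PySem.Dict.mk fused_mapping).get? proj_name with
  | some shards =>
    let shard_prefixes := shards.map (fun shard_proj_name => PySem.Str.replace prefix_ proj_name shard_proj_name)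
    match pvALoop quantized_layers none shard_prefixes with
    | some b => b
    | none => false   -- ValueError or failed assert (is_quantized is None); excluded by Pre_
  | none => quantized_layers.any (fun layer => PySem.Str.isIn layer prefix_)

-- ===== PORT B =====
-- B's `for layer in quantized_layers` loop with its early `break` once every
-- shard index has been matched.
def pvBLoop (sps : List String) (m : PySem.Set Int) : List String → PySem.Set Int
  | [] => m
  | layer :: rest =>
    let m' := PySem.Set.update m
      (((PySem.List.enumerate sps).filter (fun p => PySem.Str.isIn layer p.2)).map (·.1))
    if m'.length = sps.length then m' else pvBLoop sps m' rest

def is_layer_gptq_quantized_alt (prefix_ : String) (quantized_layers : List String) (fused_mapping : List (String × List String)) : Bool :=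
  let proj_name := ((PySem.Str.split? prefix_ ".").getD []).getLastD ""
  let shard_prefixes :=
    match (PySem.Dict.mk fused_mapping).get? proj_name with
    | some shards => shards.map (fun shard => PySem.Str.replace prefix_ proj_name shard)
    | none => [prefix_]
  if shard_prefixes = [] then false   -- failed assert (excluded by Pre_)
  else
    let matched : PySem.Set Int := pvBLoop shard_prefixes PySem.Set.empty quantized_layers
    if matched ≠ [] ∧ matched.length ≠ shard_prefixes.length then false   -- raise ValueError (excluded by Pre_)
    else !matched.isEmpty

-- ===== PRECONDITION & SPEC =====
-- Pre_ excludes exactly the inputs on which Python A raises: in the fused branch,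
-- an empty shard list (AssertionError) or shards with differing quantization flags
-- (ValueError). Python B raises the same exceptions there.
def Pre_is_layer_gptq_quantized (prefix_ : String) (quantized_layers : List String) (fused_mapping : List (String × List String)) : Prop :=
  ∀ shards ∈ (PySem.Dict.mk fused_mapping).get? (((PySem.Str.split? prefix_ ".").getD []).getLastD ""),
    shards ≠ [] ∧ ∀ a ∈ shards, ∀ b ∈ shards,
      quantized_layers.any (fun layer => PySem.Str.isIn layer (PySem.Str.replace prefix_ (((PySem.Str.split? prefix_ ".").getD []).getLastD "") a)) =
      quantized_layers.any (fun layer => PySem.Str.isIn layer (PySem.Str.replace prefix_ (((PySem.Str.split? prefix_ ".").getD []).getLastD "") b))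

instance (prefix_ : String) (quantized_layers : List String) (fused_mapping : List (String × List String)) : Decidable (Pre_is_layer_gptq_quantized prefix_ quantized_layers fused_mapping) := by unfold Pre_is_layer_gptq_quantized; infer_instance

def pvWitness_is_layer_gptq_quantized : String × List String × (List (String × List String)) :=
  ("model.layers.0.self_attn.qkv_proj", ["self_attn"], [("qkv_proj", ["q_proj", "k_proj", "v_proj"])])

def Spec_is_layer_gptq_quantized (prefix_ : String) (quantized_layers : List String) (fused_mapping : List (String × List String)) (out : Bool) : Prop := out = is_layer_gptq_quantized_alt prefix_ quantized_layers fused_mapping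
instance (prefix_ : String) (quantized_layers : List String) (fused_mapping : List (String × List String)) (out : Bool) : Decidable (Spec_is_layer_gptq_quantized prefix_ quantized_layers fused_mapping out) := by unfold Spec_is_layer_gptq_quantized; infer_instance

-- ===== CLAIM (what is proved, stated in full; the proofs are below) =====
def Claim_equal_is_layer_gptq_quantized : Prop := ∀ (prefix_ : String) (quantized_layers : List String) (fused_mapping : List (String × List String)), Dom_is_layer_gptq_quantized prefix_ quantized_layers fused_mapping → Pre_is_layer_gptq_quantized prefix_ quantized_layers fused_mapping → Spec_is_layer_gptq_quantized prefix_ quantized_layers fused_mapping (is_layer_gptq_quantized prefix_ quantized_layers fused_mapping)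

-- ===== LEMMAS AND PROOFS =====

-- A's loop with a set baseline v, fed shard prefixes whose flags all equal v, keeps v.
theorem pvALoop_const (ql : List String) (v : Bool) (sps : List String)
    (h : ∀ sp ∈ sps, ql.any (fun layer => PySem.Str.isIn layer sp) = v) :
    pvALoop ql (some v) sps = some v := by
  induction sps with
  | nil => rfl
  | cons sp rest ih =>
    have hsp : ql.any (fun layer => PySem.Str.isIn layer sp) = v := h sp (by simp)
    simp only [pvALoop, hsp, ne_eq, not_true_eq_false, if_false]
    exact ih (fun x hx => h x (List.mem_cons_of_mem _ hx))

-- membership in B's accumulated set of matched shard indices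
theorem mem_foldl_update {α β : Type} [DecidableEq β] (f : α → List β)
    (xs : List α) (init : PySem.Set β) (y : β) :
    y ∈ xs.foldl (fun m x => PySem.Set.update m (f x)) init ↔ y ∈ init ∨ ∃ x ∈ xs, y ∈ f x := by
  induction xs generalizing init with
  | nil => simp
  | cons x rest ih =>
    simp only [List.foldl_cons, ih, PySem.Set.mem_update, List.mem_cons]
    constructor
    · rintro ((h | h) | ⟨z, hz, hy⟩)
      · exact Or.inl h
      · exact Or.inr ⟨x, Or.inl rfl, h⟩
      · exact Or.inr ⟨z, Or.inr hz, hy⟩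
    · rintro (h | ⟨z, hz | hz, hy⟩)
      · exact Or.inl (Or.inl h)
      · exact Or.inl (Or.inr (hz ▸ hy))
      · exact Or.inr ⟨z, hz, hy⟩

theorem nodup_foldl_update {α β : Type} [DecidableEq β] (f : α → List β)
    (xs : List α) (init : PySem.Set β) (h : init.Nodup) :
    (xs.foldl (fun m x => PySem.Set.update m (f x)) init).Nodup := by
  induction xs generalizing init with
  | nil => exact h
  | cons x rest ih => exact ih _ (PySem.Set.nodup_update _ _ h)

-- adding only elements already present leaves a set unchanged
theorem update_eq_self {β : Type} [DecidableEq β] (s : PySem.Set β) (xs : List β)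
    (h : ∀ x ∈ xs, x ∈ s) : PySem.Set.update s xs = s := by
  induction xs generalizing s with
  | nil => rfl
  | cons x rest ih =>
    have hx : PySem.Set.add s x = s := by
      unfold PySem.Set.add
      rw [if_pos ((PySem.Set.contains_iff _ _).mpr (h x (by simp)))]
    show List.foldl PySem.Set.add (PySem.Set.add s x) rest = s
    rw [hx]
    exact ih s (fun y hy => h y (List.mem_cons_of_mem _ hy))

-- a Nodup set of shard indices of full cardinality contains every index
theorem full_mem (n : Nat) (m : PySem.Set Int) (hnd : m.Nodup)
    (hsub : ∀ y ∈ m, ∃ k : Nat, k < n ∧ y = (k : Int))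
    (hlen : m.length = n) : ∀ k : Nat, k < n → (k : Int) ∈ m := by
  have hS : m.Perm ((List.range n).map Int.ofNat) := by
    have hsubset : m ⊆ (List.range n).map Int.ofNat := by
      intro y hy
      obtain ⟨k, hk, rfl⟩ := hsub y hy
      simp only [List.mem_map, List.mem_range]
      exact ⟨k, hk, rfl⟩
    have hsp : m.Subperm ((List.range n).map Int.ofNat) := hnd.subperm hsubset
    exact hsp.perm_of_length_le (by simp [hlen])
  intro k hk
  rw [hS.mem_iff]
  simp only [List.mem_map, List.mem_range]
  exact ⟨k, hk, rfl⟩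

-- the early `break` is sound: once full, later updates add nothing
theorem pvBLoop_eq_foldl (sps : List String) (m : PySem.Set Int) (ls : List String)
    (hnd : m.Nodup) (hsub : ∀ y ∈ m, ∃ k : Nat, k < sps.length ∧ y = (k : Int)) :
    pvBLoop sps m ls = ls.foldl
      (fun m layer => PySem.Set.update m
        (((PySem.List.enumerate sps).filter
            (fun p => PySem.Str.isIn layer p.2)).map (·.1))) m := by
  induction ls generalizing m with
  | nil => rfl
  | cons layer rest ih =>
    simp only [pvBLoop, List.foldl_cons]
    set f : String → List Int := fun l =>
      ((PySem.List.enumerate sps).filter (fun p => PySem.Str.isIn l p.2)).map (·.1) with hf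
    have hidx : ∀ (l : String), ∀ y ∈ f l, ∃ k : Nat, k < sps.length ∧ y = (k : Int) := by
      intro l y hy
      rw [hf] at hy
      simp only [List.mem_map, List.mem_filter, PySem.List.mem_enumerate_iff] at hy
      obtain ⟨p, ⟨⟨k, hk, rfl⟩, _⟩, hy⟩ := hy
      exact ⟨k, hk, by simpa using hy.symm⟩
    have hnd' : (PySem.Set.update m (f layer)).Nodup := PySem.Set.nodup_update _ _ hnd
    have hsub' : ∀ y ∈ PySem.Set.update m (f layer), ∃ k : Nat, k < sps.length ∧ y = (k : Int) := by
      intro y hy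
      rcases (PySem.Set.mem_update _ _ _).mp hy with h | h
      · exact hsub y h
      · exact hidx layer y h
    split_ifs with hfull
    · -- broke out: every further update adds nothing
      set m' := PySem.Set.update m (f layer) with hm'
      have hall : ∀ k : Nat, k < sps.length → (k : Int) ∈ m' :=
        full_mem sps.length m' hnd' hsub' hfull
      have hstay : ∀ (tl : List String),
          tl.foldl (fun m l => PySem.Set.update m (f l)) m' = m' := by
        intro tl
        induction tl with
        | nil => rfl
        | cons t ts iht =>
          simp only [List.foldl_cons]
          rw [update_eq_self m' (f t) (by
            intro y hy
            obtain ⟨k, hk, rfl⟩ := hidx t y hy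
            exact hall k hk)]
          exact iht
      exact (hstay rest).symm
    · exact ih _ hnd' hsub'

-- B's shared tail on a nonempty shard-prefix list with a constant flag returns that flag.
theorem pvBTail_eq (ql : List String) (sps : List String) (hne : sps ≠ [])
    (hconst : ∀ sp ∈ sps,
      ql.any (fun layer => PySem.Str.isIn layer sp)
        = ql.any (fun layer => PySem.Str.isIn layer (sps.headD ""))) :
    (let matched : PySem.Set Int := pvBLoop sps PySem.Set.empty ql
     if matched ≠ [] ∧ matched.length ≠ sps.length then false
     else !matched.isEmpty)
      = ql.any (fun layer => PySem.Str.isIn layer (sps.headD "")) := by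
  set v := ql.any (fun layer => PySem.Str.isIn layer (sps.headD "")) with hv
  have hloop : pvBLoop sps PySem.Set.empty ql = ql.foldl
      (fun m layer => PySem.Set.update m
        (((PySem.List.enumerate sps).filter
            (fun p => PySem.Str.isIn layer p.2)).map (·.1)))
      PySem.Set.empty :=
    pvBLoop_eq_foldl sps PySem.Set.empty ql List.nodup_nil (by intro y hy; cases hy)
  set matched : PySem.Set Int := ql.foldl
      (fun m layer => PySem.Set.update m
        (((PySem.List.enumerate sps).filter
            (fun p => PySem.Str.isIn layer p.2)).map (·.1)))
      PySem.Set.empty with hm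
  rw [hloop]
  have hmem : ∀ y : Int, y ∈ matched ↔
      ∃ (k : Nat) (h : k < sps.length), y = (k : Int) ∧
        ql.any (fun layer => PySem.Str.isIn layer sps[k]) = true := by
    intro y
    rw [hm, mem_foldl_update]
    simp only [PySem.Set.empty, List.not_mem_nil, false_or, List.mem_map, List.mem_filter,
      PySem.List.mem_enumerate_iff, List.any_eq_true]
    constructor
    · rintro ⟨l, hl, p, ⟨⟨k, hk, rfl⟩, hin⟩, hy⟩
      exact ⟨k, hk, by simpa using hy.symm, l, hl, hin⟩
    · rintro ⟨k, hk, rfl, l, hl, hin⟩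
      exact ⟨l, hl, ((0 : Int) + k, sps[k]), ⟨⟨k, hk, rfl⟩, hin⟩, by simp⟩
  have hflag : ∀ (k : Nat) (h : k < sps.length),
      ql.any (fun layer => PySem.Str.isIn layer sps[k]) = v :=
    fun k h => hconst sps[k] (List.getElem_mem h)
  have hnodup : matched.Nodup := nodup_foldl_update _ _ _ List.nodup_nil
  cases hvv : v with
  | false =>
    have : matched = [] := by
      rw [List.eq_nil_iff_forall_not_mem]
      intro y hy
      obtain ⟨k, hk, _, hq⟩ := (hmem y).mp hy
      rw [hflag k hk, hvv] at hq
      exact Bool.false_ne_true hq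
    simp [this]
  | true =>
    have hn : 0 < sps.length := List.length_pos_of_ne_nil hne
    have hmem' : ∀ y : Int, y ∈ matched ↔ y ∈ (List.range sps.length).map (Int.ofNat) := by
      intro y
      rw [hmem]
      simp only [List.mem_map, List.mem_range]
      constructor
      · rintro ⟨k, hk, rfl, _⟩; exact ⟨k, hk, rfl⟩
      · rintro ⟨k, hk, rfl⟩
        exact ⟨k, hk, rfl, by rw [hflag k hk, hvv]⟩
    have hperm : matched.Perm ((List.range sps.length).map (Int.ofNat)) :=
      (List.perm_ext_iff_of_nodup hnodup
        ((List.nodup_range).map (fun a b h => Int.ofNat.inj h))).mpr hmem'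
    have hlen : matched.length = sps.length := by
      simpa using hperm.length_eq
    have hne' : matched ≠ [] := by
      intro h0
      rw [h0] at hlen
      simp at hlen
      omega
    simp only [ne_eq, hne', not_false_eq_true, hlen, not_true_eq_false, and_false, if_false]
    cases hmm : matched with
    | nil => exact absurd hmm hne'
    | cons a t => simp

theorem is_layer_gptq_quantized_spec : Claim_equal_is_layer_gptq_quantized := by
  intro prefix_ ql fm _ hpre
  unfold Spec_is_layer_gptq_quantized
  unfold Pre_is_layer_gptq_quantized at hpre
  simp only [is_layer_gptq_quantized, is_layer_gptq_quantized_alt]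
  cases hg : (PySem.Dict.mk fm).get? (((PySem.Str.split? prefix_ ".").getD []).getLastD "") with
  | none =>
    have hB := pvBTail_eq ql [prefix_] (by simp)
      (by intro sp hsp; simp only [List.mem_singleton] at hsp; simp [hsp])
    simp only [List.headD] at hB
    rw [if_neg (by simp)]
    exact hB.symm
  | some shards =>
    rw [hg] at hpre
    simp only [Option.mem_def, Option.some.injEq, forall_eq'] at hpre
    obtain ⟨hne, hall⟩ := hpre
    cases shards with
    | nil => exact absurd rfl hne
    | cons s0 rest =>
      dsimp only
      set pn := ((PySem.Str.split? prefix_ ".").getD []).getLastD "" with hpn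
      set sps := (s0 :: rest).map (fun shard => PySem.Str.replace prefix_ pn shard) with hsps
      have hconst : ∀ sp ∈ sps,
          ql.any (fun layer => PySem.Str.isIn layer sp)
            = ql.any (fun layer => PySem.Str.isIn layer (sps.headD "")) := by
        intro sp hsp
        rw [hsps] at hsp
        simp only [List.mem_map] at hsp
        obtain ⟨x, hx, rfl⟩ := hsp
        have hh : sps.headD "" = PySem.Str.replace prefix_ pn s0 := by
          rw [hsps]; simp
        rw [hh]
        exact hall x hx s0 (by simp)
      have hB := pvBTail_eq ql sps (by rw [hsps]; simp) hconst
      have hA : pvALoop ql none sps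
          = some (ql.any (fun layer => PySem.Str.isIn layer (sps.headD ""))) := by
        rw [hsps]
        simp only [List.map_cons, pvALoop, List.headD]
        exact pvALoop_const ql _ _ (by
          intro sp hsp
          have h2 := hconst sp (by rw [hsps]; simp only [List.map_cons]; exact List.mem_cons_of_mem _ hsp)
          rw [h2, hsps]; simp)
      rw [hA, if_neg (by simp)]
      exact hB.symm

-- ===== VERDICT (by name: the statement is the Claim_ definition above) =====
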